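-- pv_equiv track=rewrite | github.com/multivac61/aoc | year/2020.py | count_water_roughness
-- ===== SOURCE A (Python) =====
-- def get_all_orientations(grid):
--     orientations = []
--     current = grid
--
--     for _ in range(4):
--         orientations.append([row[:] for row in current])
--         current = [list(row) for row in zip(*current[::-1])]
--
--     flipped = [row[::-1] for row in grid]
--     current = flipped
--
--     for _ in range(4):
--         orientations.append([row[:] for row in current])
--         current = [list(row) for row in zip(*current[::-1])]
--
--     return orientations
--
-- def find_sea_monsters(image):
--     monster_pattern = [
--         "                  # ",
--         "#    ##    ##    ###",
--         " #  #  #  #  #  #   ",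
--     ]
--
--     monster_positions = []
--     for row in range(len(image) - 2):
--         for col in range(len(image[0]) - 19):
--             is_monster = True
--             for mr, monster_row in enumerate(monster_pattern):
--                 for mc, char in enumerate(monster_row):
--                     if char == "#" and image[row + mr][col + mc] != "#":
--                         is_monster = False
--                         break
--                 if not is_monster:
--                     break
--             if is_monster:
--                 monster_positions.append((row, col))
--
--     return monster_positions
--
-- def count_water_roughness(image):
--     # Convert to list of strings for easier manipulation
--     image_strings = ["".join(row) for row in image]
--
--     for orientation in get_all_orientations(image_strings):
--         monsters = find_sea_monsters(orientation)
--         if monsters: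
--             total_hash = sum(row.count("#") for row in orientation)
--             monster_hash = len(monsters) * 15  # Each monster has 15 # symbols
--             return total_hash - monster_hash
--
--     return sum(row.count("#") for row in image_strings)
-- ===== SOURCE B (Python) =====
-- # Alternative algorithm: instead of scanning every anchor position against the
-- # 20x3 pattern with nested loops and breaks, precompute the monster's 15 '#'
-- # offsets once, build the set of '#' coordinates of each orientation, and get
-- # the monster anchors as the intersection of the 15 shifted coordinate sets,
-- # restricted to the scan window.
--
-- MONSTER_OFFSETS = [
--     (0, 18),
--     (1, 0), (1, 5), (1, 6), (1, 11), (1, 12), (1, 17), (1, 18), (1, 19),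
--     (2, 1), (2, 4), (2, 7), (2, 10), (2, 13), (2, 16),
-- ]
--
--
-- def _orientations(grid):
--     out = []
--     cur = grid
--     for _ in range(4):
--         out.append(cur)
--         cur = [list(row) for row in zip(*cur[::-1])]
--     cur = [row[::-1] for row in grid]
--     for _ in range(4):
--         out.append(cur)
--         cur = [list(row) for row in zip(*cur[::-1])]
--     return out
--
--
-- def _monster_count(grid):
--     hashes = {(r, c)
--               for r, row in enumerate(grid)
--               for c, ch in enumerate(row) if ch == "#"}
--     dr0, dc0 = MONSTER_OFFSETS[0]
--     candidates = {(r - dr0, c - dc0) for (r, c) in hashes}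
--     for dr, dc in MONSTER_OFFSETS[1:]:
--         candidates &= {(r - dr, c - dc) for (r, c) in hashes}
--     rows = len(grid)
--     cols = len(grid[0]) if grid else 0
--     return sum(1 for (r, c) in candidates
--                if 0 <= r < rows - 2 and 0 <= c < cols - 19)
--
--
-- def count_water_roughness(image):
--     grid = ["".join(row) for row in image]
--     for orientation in _orientations(grid):
--         n = _monster_count(orientation)
--         if n:
--             return sum(row.count("#") for row in orientation) - 15 * n
--     return sum(row.count("#") for row in grid)
-- ===== Notes on version B (the rewrite author's own statement) =====
-- stated objective: alternative
-- what changed: find_sea_monsters's nested anchor-by-pattern scan with break flags is replaced by set algebra: precompute the monster's 15 (dr,dc) '#'-offsets, build the set of '#' coordinates of each orientation, and count monsters as the size of the intersection of the 15 shifted coordinate sets restricted to the scan window, keeping the 8-orientation first-match loop.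
-- outside the precondition, e.g. on count_water_roughness([['....................'], ['.'], ['.']]): A returns 0, B returns 0
import Mathlib
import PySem

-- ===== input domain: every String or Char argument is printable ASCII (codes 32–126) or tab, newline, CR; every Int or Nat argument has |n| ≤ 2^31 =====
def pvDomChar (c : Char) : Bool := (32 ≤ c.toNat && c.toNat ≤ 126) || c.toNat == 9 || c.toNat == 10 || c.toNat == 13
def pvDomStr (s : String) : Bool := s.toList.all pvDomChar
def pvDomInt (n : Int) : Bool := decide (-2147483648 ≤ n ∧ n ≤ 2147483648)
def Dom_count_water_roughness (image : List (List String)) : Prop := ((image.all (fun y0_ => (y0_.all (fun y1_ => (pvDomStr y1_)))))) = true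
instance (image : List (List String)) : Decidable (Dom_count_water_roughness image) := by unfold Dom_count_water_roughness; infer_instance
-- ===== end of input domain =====

-- B replaces A's nested anchor×pattern scan by intersecting the 15 shifted '#'-coordinate
-- sets of each orientation (objective: alternative algorithm, similar cost).
-- Both ports represent each joined row as a List Char (Python str and list-of-chars index
-- and compare identically here).

-- ===== PORT A =====

-- "".join(row) for each row: exact as concatenation of the rows' characters
def pvJoinRows (image : List (List String)) : List (List Char) :=
  image.map (fun row => row.flatMap String.toList)

-- zip(*g): truncating transpose, exact port of Python's zip applied to the list of rows
def pvZipStar (g : List (List Char)) : List (List Char) :=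
  match g with
  | [] => []
  | r :: rs =>
    (List.range (rs.foldl (fun m row => min m row.length) r.length)).map
      (fun i => (r :: rs).map (fun row => row.getD i ' '))

-- [list(row) for row in zip(*current[::-1])]
def pvRot (g : List (List Char)) : List (List Char) := pvZipStar g.reverse

-- get_all_orientations (the row copies row[:] are identities on our representation)
def pvOrientations (grid : List (List Char)) : List (List (List Char)) :=
  let s1 := (List.range 4).foldl
    (fun (s : List (List (List Char)) × List (List Char)) _ => (s.1 ++ [s.2], pvRot s.2))
    ([], grid)
  let flipped := grid.map List.reverse
  let s2 := (List.range 4).foldl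
    (fun (s : List (List (List Char)) × List (List Char)) _ => (s.1 ++ [s.2], pvRot s.2))
    (s1.1, flipped)
  s2.1

def pvMonsterPattern : List (List Char) :=
  ["                  # ".toList,
   "#    ##    ##    ###".toList,
   " #  #  #  #  #  #   ".toList]

-- image[r][c]; the default is never reached on admitted inputs (Python would raise there)
def pvCell (g : List (List Char)) (r c : Int) : Char :=
  PySem.List.pyGetD (PySem.List.pyGetD g r []) c ' '

-- the two inner loops of find_sea_monsters with their breaks (a broken-out flag stays false)
def pvIsMonster (g : List (List Char)) (row col : Int) : Bool :=
  (PySem.List.enumerate pvMonsterPattern).foldl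
    (fun ok p =>
      if ok then
        (PySem.List.enumerate p.2).foldl
          (fun ok2 q =>
            if ok2 then
              if q.2 == '#' && !(pvCell g (row + p.1) (col + q.1) == '#') then false else ok2
            else ok2)
          ok
      else ok)
    true

-- find_sea_monsters; len(image[0]) is only reached when the outer range is nonempty
def pvFindMonsters (g : List (List Char)) : List (Int × Int) :=
  (PySem.List.pyRange 0 ((g.length : Int) - 2)).foldl
    (fun acc row =>
      (PySem.List.pyRange 0 (((g.headD []).length : Int) - 19)).foldl
        (fun acc2 col => if pvIsMonster g row col then acc2 ++ [(row, col)] else acc2)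
        acc)
    []

-- sum(row.count("#") for row in g)
def pvHashCount (g : List (List Char)) : Int :=
  (g.map (fun row => (row.count '#' : Int))).sum

-- the for/if/return loop of count_water_roughness
def pvLoopA (img : List (List Char)) : List (List (List Char)) → Int
  | [] => pvHashCount img
  | o :: rest =>
    let monsters := pvFindMonsters o
    if monsters ≠ [] then pvHashCount o - (monsters.length : Int) * 15
    else pvLoopA img rest

def count_water_roughness (image : List (List String)) : Int :=
  let img := pvJoinRows image
  pvLoopA img (pvOrientations img)

-- ===== PORT B =====

def pvMonsterOffsets : List (Int × Int) :=
  [(0, 18),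
   (1, 0), (1, 5), (1, 6), (1, 11), (1, 12), (1, 17), (1, 18), (1, 19),
   (2, 1), (2, 4), (2, 7), (2, 10), (2, 13), (2, 16)]

-- {(r, c) for r, row in enumerate(grid) for c, ch in enumerate(row) if ch == "#"}
def pvHashSet (g : List (List Char)) : PySem.Set (Int × Int) :=
  PySem.Set.ofList ((PySem.List.enumerate g).flatMap (fun p =>
    (PySem.List.enumerate p.2).filterMap (fun q =>
      if q.2 == '#' then some (p.1, q.1) else none)))

-- {(r - dr, c - dc) for (r, c) in hashes}
def pvShifted (H : PySem.Set (Int × Int)) (d : Int × Int) : PySem.Set (Int × Int) :=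
  PySem.Set.ofList (H.map (fun p => (p.1 - d.1, p.2 - d.2)))

-- _monster_count: intersect the 15 shifted sets, count the anchors in the scan window
def pvMonsterCount (g : List (List Char)) : Int :=
  let H := pvHashSet g
  let cand := pvMonsterOffsets.tail.foldl
    (fun c d => PySem.Set.inter c (pvShifted H d))
    (pvShifted H (pvMonsterOffsets.headD (0, 0)))
  let rows : Int := g.length
  let cols : Int := (g.headD []).length
  ((cand.filter (fun p => decide (0 ≤ p.1 ∧ p.1 < rows - 2 ∧ 0 ≤ p.2 ∧ p.2 < cols - 19))).length : Int)

def pvLoopB (img : List (List Char)) : List (List (List Char)) → Int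
  | [] => pvHashCount img
  | o :: rest =>
    let n := pvMonsterCount o
    if n ≠ 0 then pvHashCount o - 15 * n
    else pvLoopB img rest

def count_water_roughness_alt (image : List (List String)) : Int :=
  let img := pvJoinRows image
  pvLoopB img (pvOrientations img)

-- ===== PRECONDITION & SPEC =====

def pvJoinedLens (image : List (List String)) : List Nat :=
  image.map (fun row => (row.flatMap String.toList).length)

-- Pre_ excludes ragged images with ≥ 3 rows whose first joined row is ≥ 20 characters:
-- there A's scan, bounded by the first row's width, can index past a shorter row and raise
-- IndexError, and where it happens not to, its value is an accident of the break order.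
def Pre_count_water_roughness (image : List (List String)) : Prop :=
  (∀ n ∈ pvJoinedLens image, n = (pvJoinedLens image).headD 0)
  ∨ image.length < 3
  ∨ (pvJoinedLens image).headD 0 < 20

instance (image : List (List String)) : Decidable (Pre_count_water_roughness image) := by
  unfold Pre_count_water_roughness; infer_instance

def pvWitness_count_water_roughness : List (List String) :=
  [["#.", "#"], ["..#"], ["###"]]

def Spec_count_water_roughness (image : List (List String)) (out : Int) : Prop := out = count_water_roughness_alt image
instance (image : List (List String)) (out : Int) : Decidable (Spec_count_water_roughness image out) := by unfold Spec_count_water_roughness; infer_instance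

-- ===== CLAIM (what is proved, stated in full; the proofs are below) =====
def Claim_equal_count_water_roughness : Prop := ∀ (image : List (List String)), Dom_count_water_roughness image → Pre_count_water_roughness image → Spec_count_water_roughness image (count_water_roughness image)

-- ===== LEMMAS AND PROOFS =====

-- rectangular: every row as long as the first
def pvRect (g : List (List Char)) : Prop := ∀ row ∈ g, row.length = (g.headD []).length

-- the per-orientation condition the counting lemma needs
def pvGood (g : List (List Char)) : Prop :=
  pvRect g ∨ g.length < 3 ∨ (g.headD []).length < 20

-- (x, y) is a '#' cell of g
def pvInH (g : List (List Char)) (x y : Int) : Prop :=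
  0 ≤ x ∧ 0 ≤ y ∧ x.toNat < g.length ∧ y.toNat < (g.getD x.toNat []).length ∧
    (g.getD x.toNat []).getD y.toNat ' ' = '#'
theorem pv_mem_hashSet (g : List (List Char)) (p : Int × Int) :
    p ∈ pvHashSet g ↔ pvInH g p.1 p.2 := by
  obtain ⟨x, y⟩ := p
  unfold pvHashSet pvInH
  rw [PySem.Set.mem_ofList]
  simp only [List.mem_flatMap, List.mem_filterMap, PySem.List.mem_enumerate_iff]
  constructor
  · rintro ⟨q, ⟨i, hi, rfl⟩, r, ⟨j, hj, rfl⟩, hsome⟩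
    simp only [zero_add] at hsome ⊢
    by_cases hch : g[i][j] = '#'
    · simp [hch] at hsome
      obtain ⟨h1, h2⟩ := hsome
      refine ⟨by omega, by omega, ?_, ?_, ?_⟩ <;>
        simp only [← h1, ← h2, Int.toNat_natCast] <;>
        simp [List.getD_eq_getElem?_getD, hi, hj, hch]
    · simp [hch] at hsome
  · rintro ⟨h0x, h0y, hx, hy, hch⟩
    refine ⟨(x, g[x.toNat]'hx), ⟨x.toNat, hx, by simp [h0x]⟩,
            (y, g[x.toNat][y.toNat]'?_), ⟨y.toNat, ?_, by simp [h0y]⟩, ?_⟩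
    · simpa [List.getD_eq_getElem?_getD, hx] using hy
    · simpa [List.getD_eq_getElem?_getD, hx] using hy
    · have : g[x.toNat][y.toNat]'(by simpa [List.getD_eq_getElem?_getD, hx] using hy) = '#' := by
        have hy' : y.toNat < g[x.toNat].length := by simpa [List.getD_eq_getElem?_getD, hx] using hy
        simpa [List.getD_eq_getElem?_getD, hx, hy'] using hch
      simp [this]
theorem pv_mem_shifted (H : PySem.Set (Int × Int)) (d : Int × Int) (p : Int × Int) :
    p ∈ pvShifted H d ↔ (p.1 + d.1, p.2 + d.2) ∈ H := by
  obtain ⟨x, y⟩ := p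
  unfold pvShifted
  rw [PySem.Set.mem_ofList]
  simp only [List.mem_map, Prod.mk.injEq]
  constructor
  · rintro ⟨q, hq, h1, h2⟩
    have : (x + d.1, y + d.2) = q := by cases q; simp at h1 h2 ⊢; omega
    rwa [this]
  · intro h
    exact ⟨_, h, by simp, by simp⟩

theorem pv_mem_foldl_inter (H : PySem.Set (Int × Int)) (l : List (Int × Int))
    (s : PySem.Set (Int × Int)) (p : Int × Int) :
    p ∈ l.foldl (fun c d => PySem.Set.inter c (pvShifted H d)) s ↔
      p ∈ s ∧ ∀ d ∈ l, (p.1 + d.1, p.2 + d.2) ∈ H := by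
  induction l generalizing s with
  | nil => simp
  | cons d l ih =>
    simp only [List.foldl_cons, ih, PySem.Set.mem_inter, pv_mem_shifted, List.mem_cons]
    constructor
    · rintro ⟨⟨h1, h2⟩, h3⟩
      exact ⟨h1, by rintro e (rfl | he); exacts [h2, h3 e he]⟩
    · rintro ⟨h1, h2⟩
      exact ⟨⟨h1, h2 d (Or.inl rfl)⟩, fun e he => h2 e (Or.inr he)⟩

theorem pv_mem_cand (g : List (List Char)) (p : Int × Int) :
    (p ∈ pvMonsterOffsets.tail.foldl
        (fun c d => PySem.Set.inter c (pvShifted (pvHashSet g) d))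
        (pvShifted (pvHashSet g) (pvMonsterOffsets.headD (0, 0)))) ↔
      ∀ d ∈ pvMonsterOffsets, pvInH g (p.1 + d.1) (p.2 + d.2) := by
  rw [pv_mem_foldl_inter, pv_mem_shifted]
  have hsplit : pvMonsterOffsets = pvMonsterOffsets.headD (0, 0) :: pvMonsterOffsets.tail := rfl
  rw [hsplit]
  simp only [List.mem_cons, pv_mem_hashSet]
  constructor
  · rintro ⟨h1, h2⟩ e (rfl | he)
    exacts [h1, h2 e he]
  · intro h
    exact ⟨h _ (Or.inl rfl), fun e he => h e (Or.inr he)⟩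

theorem pv_nodup_foldl_inter (H : PySem.Set (Int × Int)) (l : List (Int × Int))
    (s : PySem.Set (Int × Int)) (hs : s.Nodup) :
    (l.foldl (fun c d => PySem.Set.inter c (pvShifted H d)) s).Nodup := by
  induction l generalizing s with
  | nil => exact hs
  | cons d l ih => exact ih _ (PySem.Set.nodup_inter _ _ hs)

theorem pv_nodup_cand (g : List (List Char)) :
    (pvMonsterOffsets.tail.foldl
        (fun c d => PySem.Set.inter c (pvShifted (pvHashSet g) d))
        (pvShifted (pvHashSet g) (pvMonsterOffsets.headD (0, 0)))).Nodup := by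
  exact pv_nodup_foldl_inter _ _ _ (PySem.Set.nodup_ofList _)
theorem pv_isMonster_eq_any (g : List (List Char)) (r c : Int) :
    pvIsMonster g r c =
      !((PySem.List.enumerate pvMonsterPattern).any (fun p =>
        (PySem.List.enumerate p.2).any (fun q =>
          q.2 == '#' && !(pvCell g (r + p.1) (c + q.1) == '#')))) := by
  unfold pvIsMonster
  rw [PySem.List.foldl_congr_mem _ _
      (fun ok p => if (PySem.List.enumerate p.2).any (fun q =>
          q.2 == '#' && !(pvCell g (r + p.1) (c + q.1) == '#')) then false else ok) _ ?hout]
  · rw [PySem.List.foldl_if_false_eq]; simp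
  case hout =>
    intro ok p _
    rw [PySem.List.foldl_congr_mem _ _
        (fun ok2 q => if (q.2 == '#' && !(pvCell g (r + p.1) (c + q.1) == '#'))
          then false else ok2) _ ?hin]
    · rw [PySem.List.foldl_if_false_eq]
      cases ok <;> cases h : (PySem.List.enumerate p.2).any (fun q =>
          q.2 == '#' && !(pvCell g (r + p.1) (c + q.1) == '#')) <;> simp [h]
    case hin =>
      intro ok2 q _
      cases ok2 <;> cases h : (q.2 == '#' && !(pvCell g (r + p.1) (c + q.1) == '#')) <;> simp [h]

theorem pv_pattern_lit : pvMonsterPattern =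
  [[' ', ' ', ' ', ' ', ' ', ' ', ' ', ' ', ' ', ' ', ' ', ' ', ' ', ' ', ' ', ' ', ' ', ' ', '#', ' '],
   ['#', ' ', ' ', ' ', ' ', '#', '#', ' ', ' ', ' ', ' ', '#', '#', ' ', ' ', ' ', ' ', '#', '#', '#'],
   [' ', '#', ' ', ' ', '#', ' ', ' ', '#', ' ', ' ', '#', ' ', ' ', '#', ' ', ' ', '#', ' ', ' ', ' ']] := by
  decide

theorem pv_isMonster_iff (g : List (List Char)) (r c : Int) :
    pvIsMonster g r c = true ↔ ∀ d ∈ pvMonsterOffsets, pvCell g (r + d.1) (c + d.2) = '#' := by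
  rw [pv_isMonster_eq_any, pv_pattern_lit]
  simp [PySem.List.enumerate, pvMonsterOffsets]
  tauto
theorem pv_findMonsters_eq (g : List (List Char)) :
    pvFindMonsters g =
      (PySem.List.pyRange 0 ((g.length : Int) - 2)).flatMap (fun row =>
        ((PySem.List.pyRange 0 (((g.headD []).length : Int) - 19)).filter
          (fun col => pvIsMonster g row col)).map (fun col => (row, col))) := by
  unfold pvFindMonsters
  rw [PySem.List.foldl_congr_mem _ _
      (fun acc row => acc ++ ((PySem.List.pyRange 0 (((g.headD []).length : Int) - 19)).filter
        (fun col => pvIsMonster g row col)).map (fun col => (row, col))) _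
      (by intro acc row _; exact PySem.List.foldl_append_if _ _ _ _)]
  exact (PySem.List.foldl_append_eq_flatMap _ _ []).trans (List.nil_append _)

theorem pv_mem_findMonsters (g : List (List Char)) (p : Int × Int) :
    p ∈ pvFindMonsters g ↔
      (0 ≤ p.1 ∧ p.1 < (g.length : Int) - 2 ∧ 0 ≤ p.2 ∧ p.2 < ((g.headD []).length : Int) - 19
        ∧ pvIsMonster g p.1 p.2 = true) := by
  obtain ⟨x, y⟩ := p
  rw [pv_findMonsters_eq]
  simp only [List.mem_flatMap, List.mem_map, List.mem_filter, PySem.List.mem_pyRange_one,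
    Prod.mk.injEq]
  constructor
  · rintro ⟨r, ⟨hr1, hr2⟩, c, ⟨⟨hc1, hc2⟩, hm⟩, h1, h2⟩
    subst h1; subst h2; exact ⟨hr1, hr2, hc1, hc2, hm⟩
  · rintro ⟨h1, h2, h3, h4, h5⟩
    exact ⟨x, ⟨h1, h2⟩, y, ⟨⟨h3, h4⟩, h5⟩, rfl, rfl⟩

theorem pv_nodup_findMonsters (g : List (List Char)) : (pvFindMonsters g).Nodup := by
  rw [pv_findMonsters_eq]
  rw [List.nodup_flatMap]
  constructor
  · intro r _
    exact ((PySem.List.nodup_pyRange_one _ _).filter _).map (by intro a b h; simpa using h)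
  · refine (PySem.List.pairwise_lt_pyRange_one 0 _).imp ?_
    intro a b hab p hp hq
    simp only [List.mem_map, List.mem_filter] at hp hq
    obtain ⟨c1, _, h1⟩ := hp
    obtain ⟨c2, _, h2⟩ := hq
    rw [← h1] at h2
    cases h2
    omega
theorem pv_offsets_bounds : ∀ d ∈ pvMonsterOffsets, 0 ≤ d.1 ∧ d.1 ≤ 2 ∧ 0 ≤ d.2 ∧ d.2 ≤ 19 := by
  decide

theorem pv_cell_iff_inH (g : List (List Char)) (hR : pvRect g) (r c : Int) (d : Int × Int)
    (hd : d ∈ pvMonsterOffsets)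
    (hr : 0 ≤ r) (hr2 : r < (g.length : Int) - 2)
    (hc : 0 ≤ c) (hc2 : c < ((g.headD []).length : Int) - 19) :
    pvCell g (r + d.1) (c + d.2) = '#' ↔ pvInH g (r + d.1) (c + d.2) := by
  obtain ⟨hd1, hd2, hd3, hd4⟩ := pv_offsets_bounds d hd
  have hx0 : 0 ≤ r + d.1 := by omega
  have hxR : r + d.1 < (g.length : Int) := by omega
  have hxN : (r + d.1).toNat < g.length := by omega
  have hrowD : g.getD (r + d.1).toNat [] = g[(r + d.1).toNat] := by
    simp [List.getD_eq_getElem?_getD, hxN]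
  have hlen : g[(r + d.1).toNat].length = (g.headD []).length :=
    hR _ (List.getElem_mem hxN)
  have hy0 : 0 ≤ c + d.2 := by omega
  have hyN : (c + d.2).toNat < g[(r + d.1).toNat].length := by omega
  have hcell : pvCell g (r + d.1) (c + d.2) = g[(r + d.1).toNat][(c + d.2).toNat] := by
    unfold pvCell
    rw [PySem.List.pyGetD_eq_getElem g _ hx0 hxR,
        PySem.List.pyGetD_eq_getElem _ _ hy0 (by omega)]
  unfold pvInH
  rw [hcell, hrowD]
  constructor
  · intro h
    exact ⟨hx0, hy0, hxN, hyN, by simp [List.getD_eq_getElem?_getD, hyN, h]⟩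
  · rintro ⟨-, -, -, -, h⟩
    simpa [List.getD_eq_getElem?_getD, hyN] using h

theorem pv_count_eq (g : List (List Char)) (hg : pvGood g) :
    ((pvFindMonsters g).length : Int) = pvMonsterCount g := by
  unfold pvMonsterCount
  have hperm : (pvFindMonsters g).Perm
      ((pvMonsterOffsets.tail.foldl
          (fun c d => PySem.Set.inter c (pvShifted (pvHashSet g) d))
          (pvShifted (pvHashSet g) (pvMonsterOffsets.headD (0, 0)))).filter
        (fun p => decide (0 ≤ p.1 ∧ p.1 < (g.length : Int) - 2 ∧ 0 ≤ p.2 ∧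
          p.2 < ((g.headD []).length : Int) - 19))) := by
    rw [List.perm_ext_iff_of_nodup (pv_nodup_findMonsters g)
        ((pv_nodup_cand g).filter _)]
    intro p
    rw [pv_mem_findMonsters, List.mem_filter, pv_mem_cand]
    simp only [decide_eq_true_eq]
    constructor
    · rintro ⟨h1, h2, h3, h4, h5⟩
      rcases hg with hrect | hrows | hhead
      · rw [pv_isMonster_iff] at h5
        refine ⟨fun d hd => ?_, h1, h2, h3, h4⟩
        exact (pv_cell_iff_inH g hrect p.1 p.2 d hd h1 h2 h3 h4).mp (h5 d hd)
      · omega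
      · omega
    · rintro ⟨hall, h1, h2, h3, h4⟩
      rcases hg with hrect | hrows | hhead
      · refine ⟨h1, h2, h3, h4, ?_⟩
        rw [pv_isMonster_iff]
        exact fun d hd => (pv_cell_iff_inH g hrect p.1 p.2 d hd h1 h2 h3 h4).mpr (hall d hd)
      · omega
      · omega
  rw [hperm.length_eq]

theorem pv_loop_eq (img : List (List Char)) (os : List (List (List Char)))
    (h : ∀ o ∈ os, pvGood o) : pvLoopA img os = pvLoopB img os := by
  induction os with
  | nil => rfl
  | cons o rest ih =>
    have hc := pv_count_eq o (h o List.mem_cons_self)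
    simp only [pvLoopA, pvLoopB]
    have hne : (pvFindMonsters o ≠ []) ↔ pvMonsterCount o ≠ 0 := by
      rw [← hc]
      rw [ne_eq, ← List.length_eq_zero_iff]
      omega
    by_cases hmon : pvFindMonsters o ≠ []
    · rw [if_pos hmon, if_pos (hne.mp hmon), ← hc]; ring
    · rw [if_neg hmon, if_neg (fun hx => hmon (hne.mpr hx))]
      exact ih (fun o' ho' => h o' (List.mem_cons_of_mem _ ho'))
theorem pv_rect_zipStar (g : List (List Char)) : pvRect (pvZipStar g) := by
  cases g with
  | nil => intro row hrow; simp [pvZipStar] at hrow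
  | cons r rs =>
    have hZ : pvZipStar (r :: rs) =
        (List.range (rs.foldl (fun m row => min m row.length) r.length)).map
          (fun i => (r :: rs).map (fun row => row.getD i ' ')) := rfl
    intro row hrow
    rw [hZ] at hrow ⊢
    have hlen : ∀ x ∈ (List.range (rs.foldl (fun m row => min m row.length) r.length)).map
        (fun i => (r :: rs).map (fun row => row.getD i ' ')), x.length = rs.length + 1 := by
      intro x hx
      simp only [List.mem_map] at hx
      obtain ⟨i, -, rfl⟩ := hx
      simp
    rw [hlen row hrow]
    cases h : (List.range (rs.foldl (fun m row => min m row.length) r.length)).map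
        (fun i => (r :: rs).map (fun row => row.getD i ' ')) with
    | nil => rw [h] at hrow; simp at hrow
    | cons a t =>
      rw [List.headD_cons, hlen a (by rw [h]; exact List.mem_cons_self)]

theorem pv_good_rot (g : List (List Char)) : pvGood (pvRot g) :=
  Or.inl (pv_rect_zipStar g.reverse)

theorem pv_good_flip (g : List (List Char)) (hg : pvGood g) : pvGood (g.map List.reverse) := by
  unfold pvGood pvRect at hg ⊢
  cases g with
  | nil => simp
  | cons r rs =>
    simp only [List.map_cons, List.headD_cons, List.length_cons, List.length_map] at hg ⊢
    rcases hg with hrect | hrows | hhead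
    · left
      rintro row hrow
      simp only [List.mem_cons, List.mem_map] at hrow
      rcases hrow with rfl | ⟨a, ha, rfl⟩
      · simp
      · simpa using hrect a (List.mem_cons_of_mem _ ha)
    · right; left; simpa using hrows
    · right; right; simpa using hhead

theorem pv_orients_lit (g : List (List Char)) :
    pvOrientations g =
      [g, pvRot g, pvRot (pvRot g), pvRot (pvRot (pvRot g)),
       g.map List.reverse, pvRot (g.map List.reverse),
       pvRot (pvRot (g.map List.reverse)), pvRot (pvRot (pvRot (g.map List.reverse)))] := rfl

theorem pv_good_orientations (g : List (List Char)) (hg : pvGood g) :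
    ∀ o ∈ pvOrientations g, pvGood o := by
  intro o ho
  rw [pv_orients_lit] at ho
  simp only [List.mem_cons, List.not_mem_nil, or_false] at ho
  rcases ho with rfl | rfl | rfl | rfl | rfl | rfl | rfl | rfl
  exacts [hg, pv_good_rot _, pv_good_rot _, pv_good_rot _,
    pv_good_flip _ hg, pv_good_rot _, pv_good_rot _, pv_good_rot _]

theorem pv_good_of_pre (image : List (List String))
    (h : Pre_count_water_roughness image) : pvGood (pvJoinRows image) := by
  unfold Pre_count_water_roughness pvJoinedLens at h
  unfold pvGood pvRect pvJoinRows
  cases image with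
  | nil => simp
  | cons r rs =>
    simp only [List.map_cons, List.headD_cons, List.length_cons, List.length_map] at h ⊢
    rcases h with hrect | hrows | hhead
    · left
      rintro row hrow
      simp only [List.mem_cons, List.mem_map] at hrow
      rcases hrow with rfl | ⟨a, ha, rfl⟩
      · rfl
      · have := hrect _ (List.mem_cons_of_mem _ (List.mem_map_of_mem ha))
        simpa using this
    · right; left; simpa using hrows
    · right; right; simpa using hhead

-- ===== VERDICT (by name: the statement is the Claim_ definition above) =====
theorem count_water_roughness_spec : Claim_equal_count_water_roughness := by
  intro image _ hpre
  unfold Spec_count_water_roughness count_water_roughness count_water_roughness_alt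
  exact pv_loop_eq _ _ (pv_good_orientations _ (pv_good_of_pre image hpre))
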